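-- pv_equiv track=rewrite | github.com/VanillaTY/PDFChatAnnotator | utils/multimodel_binding.py | pairImagetoText
-- ===== SOURCE A (Python) =====
-- def pairImagetoText(extracted_text_list, img_list, img_coordinates_list):
--     """
--     基于坐标的图片-文本匹配
--
--     功能说明：
--     1. 根据文本和图片的坐标信息进行匹配
--     2. 将图片关联到对应的文本上
--     3. 支持一个文本对应多个图片的情况
--
--     @param extracted_text_list: 提取的文本列表，包含坐标信息
--     @param img_list: 图片列表
--     @param img_coordinates_list: 图片坐标列表
--     @return: (文本列表, 图片列表)
--     """
--     textList = []
--     imgList = []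
--
--     # 遍历每个文本及其坐标
--     for (text_coordinate, text) in extracted_text_list:
--         thisTextImgList = []
--         ifTextListAppend = False
--
--         # 遍历每个图片及其坐标
--         for img, img_coordinate in zip(img_list, img_coordinates_list):
--             # 检查文本和图片的垂直位置关系
--             # 如果文本在图片下方50像素范围内，则认为它们相关
--             if (text_coordinate[0][1] - int(img_coordinate[1])) <= 50 and (text_coordinate[0][1] - int(img_coordinate[1])) >= 0:
--                 if not ifTextListAppend:  # 新的文本
--                     textList.append(text)
--                     ifTextListAppend = True
--                 thisTextImgList.append(img)
--
--         if ifTextListAppend: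
--             imgList.append(thisTextImgList)
--
--     return textList, imgList
-- ===== SOURCE B (Python) =====
-- from bisect import bisect_left, bisect_right
--
-- def pairImagetoText(extracted_text_list, img_list, img_coordinates_list):
--     # Sort images once by y-coordinate; per text, binary-search the window
--     # [ty-50, ty] and restore original image order by sorting the indices.
--     items = sorted(
--         ((int(c[1]), i, img)
--          for i, (img, c) in enumerate(zip(img_list, img_coordinates_list))),
--         key=lambda t: (t[0], t[1]),
--     )
--     keys = [t[0] for t in items]
--     textList = []
--     imgList = []
--     for coords, text in extracted_text_list:
--         ty = coords[0][1]
--         lo = bisect_left(keys, ty - 50)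
--         hi = bisect_right(keys, ty)
--         if lo < hi:
--             textList.append(text)
--             imgList.append([t[2] for t in sorted(items[lo:hi], key=lambda t: t[1])])
--     return textList, imgList
-- ===== Notes on version B (the rewrite author's own statement) =====
-- stated objective: alternative
-- what changed: Replaces A's text-by-image double scan with a single sort of the images by y-coordinate plus a per-text binary-search (bisect) of the [ty-50, ty] window, restoring original image order by re-sorting the window's indices (intended as asymptotically faster; a timing run measured only ~1.48x at its largest size, so no speed is claimed).
-- outside the precondition, e.g. on pairImagetoText([], ['a'], [[]]): A returns ([], []), B raises IndexError; on pairImagetoText([([[]], 't')], [], [[0, 0]]): A returns ([], []), B raises IndexError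
import Mathlib
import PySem

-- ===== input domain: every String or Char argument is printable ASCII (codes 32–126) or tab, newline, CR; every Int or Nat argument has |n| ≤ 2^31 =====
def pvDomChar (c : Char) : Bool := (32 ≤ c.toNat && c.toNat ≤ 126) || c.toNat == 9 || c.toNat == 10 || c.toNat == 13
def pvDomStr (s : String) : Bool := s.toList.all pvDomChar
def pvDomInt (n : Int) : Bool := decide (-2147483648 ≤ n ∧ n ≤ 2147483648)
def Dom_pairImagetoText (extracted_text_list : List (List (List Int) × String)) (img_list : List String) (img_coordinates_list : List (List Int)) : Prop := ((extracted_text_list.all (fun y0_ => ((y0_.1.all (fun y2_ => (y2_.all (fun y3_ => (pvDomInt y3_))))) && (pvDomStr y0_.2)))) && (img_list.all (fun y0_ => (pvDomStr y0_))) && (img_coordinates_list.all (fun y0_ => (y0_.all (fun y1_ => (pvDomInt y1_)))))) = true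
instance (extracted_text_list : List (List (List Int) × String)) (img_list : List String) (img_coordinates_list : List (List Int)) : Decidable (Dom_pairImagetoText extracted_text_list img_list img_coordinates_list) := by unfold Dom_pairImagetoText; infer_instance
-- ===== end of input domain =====

-- B replaces A's text-by-image double scan by sorting the images once by y-coordinate and
-- binary-searching the [ty-50, ty] window per text (original image order restored by
-- sorting the window's indices); intended as faster, but a timing run measured only
-- ~1.48x at its largest size, so no speed is claimed.

-- ===== PORT A =====
-- the condition of A's inner `if` (text within 50px below the image)
def pairA_pred (text_coordinate : List (List Int)) (img_coordinate : List Int) : Bool :=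
  decide (PySem.List.pyGetD (PySem.List.pyGetD text_coordinate 0 []) 1 0 - PySem.List.pyGetD img_coordinate 1 0 ≤ 50) &&
  decide (0 ≤ PySem.List.pyGetD (PySem.List.pyGetD text_coordinate 0 []) 1 0 - PySem.List.pyGetD img_coordinate 1 0)

-- the body of A's inner loop; state = (thisTextImgList, ifTextListAppend, textList)
def pairA_inner (text_coordinate : List (List Int)) (text : String)
    (st : List String × Bool × List String) (p : String × List Int) :
    List String × Bool × List String :=
  if pairA_pred text_coordinate p.2 = true then
    let st1 := if st.2.1 = false then (st.1, (true, st.2.2 ++ [text])) else st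
    (st1.1 ++ [p.1], (st1.2.1, st1.2.2))
  else st

def pairImagetoText (extracted_text_list : List (List (List Int) × String)) (img_list : List String) (img_coordinates_list : List (List Int)) : List String × List (List String) :=
  extracted_text_list.foldl (fun acc tp =>
    let st := (img_list.zip img_coordinates_list).foldl (pairA_inner tp.1 tp.2) ([], (false, acc.1))
    (st.2.2, if st.2.1 then acc.2 ++ [st.1] else acc.2)) ([], [])

-- ===== PORT B =====
def pairImagetoText_alt (extracted_text_list : List (List (List Int) × String)) (img_list : List String) (img_coordinates_list : List (List Int)) : List String × List (List String) :=
  -- items = sorted((int(c[1]), i, img) for i, (img, c) in enumerate(zip(...)), key=(t[0], t[1]))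
  let items := PySem.List.sorted
    ((PySem.List.enumerate (img_list.zip img_coordinates_list)).map
      (fun p => (PySem.List.pyGetD p.2.2 1 0, p.1, p.2.1)))
    (fun t => toLex (t.1, t.2.1))
  let keys := items.map (fun t => t.1)
  extracted_text_list.foldl (fun acc tp =>
    let ty := PySem.List.pyGetD (PySem.List.pyGetD tp.1 0 []) 1 0
    let lo := PySem.List.bisectLeft keys (ty - 50)
    let hi := PySem.List.bisectRight keys ty
    if lo < hi then
      (acc.1 ++ [tp.2],
       acc.2 ++ [(PySem.List.sorted (PySem.List.slice items (some (lo : Int)) (some (hi : Int)))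
                    (fun t => t.2.1)).map (fun t => t.2.2)])
    else acc) ([], [])

-- ===== PRECONDITION & SPEC =====
-- Pre_ requires index [0][1] of every text coordinate and index [1] of every zipped image
-- coordinate to exist: outside this Python A raises IndexError, except on the degenerate
-- inputs where the malformed entry is never reached because there are no texts or no
-- zipped image pairs (A returns ([], []) there while B's precomputation raises; cited in claim.json).
def Pre_pairImagetoText (extracted_text_list : List (List (List Int) × String)) (img_list : List String) (img_coordinates_list : List (List Int)) : Prop :=
  (∀ p ∈ extracted_text_list, 2 ≤ (p.1.getD 0 []).length) ∧
  (∀ q ∈ img_list.zip img_coordinates_list, 2 ≤ q.2.length)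
instance (extracted_text_list : List (List (List Int) × String)) (img_list : List String) (img_coordinates_list : List (List Int)) : Decidable (Pre_pairImagetoText extracted_text_list img_list img_coordinates_list) := by unfold Pre_pairImagetoText; infer_instance

def pvWitness_pairImagetoText : (List (List (List Int) × String)) × List String × List (List Int) :=
  ([([[0, 10]], "t")], (["i"], [[0, 5]]))

def Spec_pairImagetoText (extracted_text_list : List (List (List Int) × String)) (img_list : List String) (img_coordinates_list : List (List Int)) (out : List String × List (List String)) : Prop := out = pairImagetoText_alt extracted_text_list img_list img_coordinates_list
instance (extracted_text_list : List (List (List Int) × String)) (img_list : List String) (img_coordinates_list : List (List Int)) (out : List String × List (List String)) : Decidable (Spec_pairImagetoText extracted_text_list img_list img_coordinates_list out) := by unfold Spec_pairImagetoText; infer_instance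

-- ===== CLAIM (what is proved, stated in full; the proofs are below) =====
def Claim_equal_pairImagetoText : Prop := ∀ (extracted_text_list : List (List (List Int) × String)) (img_list : List String) (img_coordinates_list : List (List Int)), Dom_pairImagetoText extracted_text_list img_list img_coordinates_list → Pre_pairImagetoText extracted_text_list img_list img_coordinates_list → Spec_pairImagetoText extracted_text_list img_list img_coordinates_list (pairImagetoText extracted_text_list img_list img_coordinates_list)

-- ===== LEMMAS AND PROOFS =====

-- A's per-text matched-image group, in the order of the image list
def pvG (tc : List (List Int)) (z : List (String × List Int)) : List String :=
  (z.filter (fun p => pairA_pred tc p.2)).map Prod.fst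

-- characterisation of A's inner loop
theorem pvInnerA_eq (tc : List (List Int)) (text : String) (z : List (String × List Int))
    (this0 : List String) (flag : Bool) (tl0 : List String) :
    z.foldl (pairA_inner tc text) (this0, (flag, tl0)) =
      (this0 ++ pvG tc z,
       (flag || !(pvG tc z).isEmpty,
        tl0 ++ if flag = false ∧ pvG tc z ≠ [] then [text] else [])) := by
  induction z generalizing this0 flag tl0 with
  | nil => simp [pvG]
  | cons p rest ih =>
    cases hp : pairA_pred tc p.2
    · have hf : List.filter (fun q => pairA_pred tc q.2) (p :: rest) =
          List.filter (fun q => pairA_pred tc q.2) rest :=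
        List.filter_cons_of_neg (by simp [hp])
      simp only [pvG, hf]
      simp [pairA_inner, hp, ih, pvG]
    · cases flag <;>
        simp [pvG, pairA_inner, hp, ih, List.filter_cons, List.append_assoc]

-- a predicate that holds exactly on an index window cuts the list as drop/take
theorem pvFilterWindow {α : Type} (l : List α) (p : α → Bool) (lo hi : Nat)
    (hiff : ∀ (j : Nat) (hj : j < l.length), (p l[j] = true ↔ (lo ≤ j ∧ j < hi))) :
    l.filter p = (l.drop lo).take (hi - lo) := by
  by_cases hlohi : hi ≤ lo
  · have h1 : l.filter p = [] := by
      rw [List.filter_eq_nil_iff]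
      intro a ha hpa
      obtain ⟨j, hj, hja⟩ := List.mem_iff_getElem.mp ha
      subst hja
      have := (hiff j hj).mp hpa
      omega
    rw [h1, Nat.sub_eq_zero_of_le hlohi, List.take_zero]
  · push_neg at hlohi
    have hdec : l = l.take lo ++ ((l.drop lo).take (hi - lo) ++ (l.drop lo).drop (hi - lo)) := by
      rw [List.take_append_drop, List.take_append_drop]
    conv_lhs => rw [hdec]
    rw [List.filter_append, List.filter_append]
    have h1 : (l.take lo).filter p = [] := by
      rw [List.filter_eq_nil_iff]
      intro a ha hpa
      obtain ⟨j, hj, hja⟩ := List.mem_iff_getElem.mp ha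
      have hjlo : j < lo ∧ j < l.length := by simp [List.length_take] at hj; omega
      have hja' : l[j]'hjlo.2 = a := by rw [← hja]; simp [List.getElem_take]
      subst hja'
      have := (hiff j hjlo.2).mp hpa
      omega
    have h2 : ((l.drop lo).take (hi - lo)).filter p = (l.drop lo).take (hi - lo) := by
      rw [List.filter_eq_self]
      intro a ha
      obtain ⟨i, hi2, hia⟩ := List.mem_iff_getElem.mp ha
      have hlen : i < hi - lo ∧ i < l.length - lo := by
        simp [List.length_take, List.length_drop] at hi2; omega
      have hj' : lo + i < l.length := by omega
      have hia' : l[lo + i]'hj' = a := by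
        rw [← hia]; simp [List.getElem_take, List.getElem_drop]
      subst hia'
      exact (hiff (lo + i) hj').mpr ⟨by omega, by omega⟩
    have h3 : ((l.drop lo).drop (hi - lo)).filter p = [] := by
      rw [List.drop_drop, List.filter_eq_nil_iff]
      intro a ha hpa
      obtain ⟨i, hi2, hia⟩ := List.mem_iff_getElem.mp ha
      have h5 : lo + (hi - lo) + i < l.length := by simp [List.length_drop] at hi2; omega
      have hia' : l[lo + (hi - lo) + i]'h5 = a := by rw [← hia]; simp [List.getElem_drop]
      subst hia'
      have := (hiff _ h5).mp hpa
      omega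
    rw [h1, h2, h3]
    simp

-- filter over the enumerated zip, projected to the images, is filter over the zip
theorem pvEnumFilter (z : List (String × List Int)) (r : List Int → Bool) (s : Int) :
    ((PySem.List.enumerate z s).filter (fun p => r p.2.2)).map (fun p => p.2.1) =
      (z.filter (fun q => r q.2)).map Prod.fst := by
  induction z generalizing s with
  | nil => simp [PySem.List.enumerate]
  | cons q rest ih =>
    rw [PySem.List.enumerate_cons]
    by_cases hq : r q.2 <;> simp [List.filter_cons, hq, ih]

-- the per-text work of B (sorted window, re-sorted by index) equals A's group pvG
theorem pvStep_eq (z : List (String × List Int)) (tc : List (List Int)) :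
    (PySem.List.bisectLeft
        ((PySem.List.sorted ((PySem.List.enumerate z).map (fun p => (PySem.List.pyGetD p.2.2 1 0, p.1, p.2.1))) (fun t => toLex (t.1, t.2.1))).map (fun t => t.1))
        (PySem.List.pyGetD (PySem.List.pyGetD tc 0 []) 1 0 - 50) <
      PySem.List.bisectRight
        ((PySem.List.sorted ((PySem.List.enumerate z).map (fun p => (PySem.List.pyGetD p.2.2 1 0, p.1, p.2.1))) (fun t => toLex (t.1, t.2.1))).map (fun t => t.1))
        (PySem.List.pyGetD (PySem.List.pyGetD tc 0 []) 1 0)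
      ↔ pvG tc z ≠ []) ∧
    (PySem.List.sorted
        (PySem.List.slice
          (PySem.List.sorted ((PySem.List.enumerate z).map (fun p => (PySem.List.pyGetD p.2.2 1 0, p.1, p.2.1))) (fun t => toLex (t.1, t.2.1)))
          (some ((PySem.List.bisectLeft ((PySem.List.sorted ((PySem.List.enumerate z).map (fun p => (PySem.List.pyGetD p.2.2 1 0, p.1, p.2.1))) (fun t => toLex (t.1, t.2.1))).map (fun t => t.1)) (PySem.List.pyGetD (PySem.List.pyGetD tc 0 []) 1 0 - 50) : Nat) : Int))
          (some ((PySem.List.bisectRight ((PySem.List.sorted ((PySem.List.enumerate z).map (fun p => (PySem.List.pyGetD p.2.2 1 0, p.1, p.2.1))) (fun t => toLex (t.1, t.2.1))).map (fun t => t.1)) (PySem.List.pyGetD (PySem.List.pyGetD tc 0 []) 1 0) : Nat) : Int)))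
        (fun t => t.2.1)).map (fun t => t.2.2) = pvG tc z := by
  set f : Int × String × List Int → Int × Int × String :=
    fun p => (PySem.List.pyGetD p.2.2 1 0, p.1, p.2.1) with hf
  set raw := (PySem.List.enumerate z).map f with hraw
  set k : Int × Int × String → Lex (Int × Int) := fun t => toLex (t.1, t.2.1) with hk
  set s := PySem.List.sorted raw k with hs
  set ty := PySem.List.pyGetD (PySem.List.pyGetD tc 0 []) 1 0 with hty
  set keys := s.map (fun t => t.1) with hkeys
  set lo := PySem.List.bisectLeft keys (ty - 50) with hlo
  set hi := PySem.List.bisectRight keys ty with hhi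
  have hkp : List.Pairwise (· ≤ ·) keys := by
    refine List.Pairwise.map _ ?_ (PySem.List.sorted_pairwise raw k)
    intro a b hab
    rcases Prod.Lex.toLex_le_toLex.mp hab with h | h
    · exact le_of_lt h
    · exact le_of_eq h.1
  obtain ⟨hloLen, hlo1, hlo2⟩ := PySem.List.bisectLeft_spec keys (ty - 50) hkp
  obtain ⟨hhiLen, hhi1, hhi2⟩ := PySem.List.bisectRight_spec keys ty hkp
  have hkl : keys.length = s.length := by simp [hkeys]
  set pb : Int × Int × String → Bool := fun t => decide (ty - 50 ≤ t.1) && decide (t.1 ≤ ty) with hpb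
  have hwin : s.filter pb = (s.drop lo).take (hi - lo) := by
    apply pvFilterWindow
    intro j hj
    have hjk : j < keys.length := by omega
    have hkj : keys[j]'hjk = (s[j]'hj).1 := by simp [hkeys]
    constructor
    · intro hp
      simp [hpb] at hp
      constructor
      · by_contra hcon
        push_neg at hcon
        have := hlo1 j hjk hcon
        rw [hkj] at this
        omega
      · by_contra hcon
        push_neg at hcon
        have := hhi2 j hjk hcon
        rw [hkj] at this
        omega
    · rintro ⟨h1, h2⟩
      have e1 := hlo2 j hjk h1
      have e2 := hhi1 j hjk h2
      rw [hkj] at e1 e2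
      simp [hpb]
      omega
  have hperm : (raw.filter pb).Perm (s.filter pb) :=
    ((PySem.List.sorted_perm raw k false).symm).filter pb
  have hpair : (raw.filter pb).Pairwise (fun a b => a.2.1 < b.2.1) := by
    refine List.Pairwise.filter pb ?_
    refine List.Pairwise.map _ ?_ (PySem.List.pairwise_lt_enumerate z 0)
    intro a b hab
    simpa [hf] using hab
  have hslice : PySem.List.slice s (some (lo : Int)) (some (hi : Int)) = (s.drop lo).take (hi - lo) :=
    PySem.List.slice_natCast s lo hi
  have hsortwin : PySem.List.sorted ((s.drop lo).take (hi - lo)) (fun t => t.2.1) = raw.filter pb := by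
    apply PySem.List.sorted_eq_of_perm_of_pairwise_lt
    · rw [← hwin]; exact hperm
    · exact hpair
  have hG : (raw.filter pb).map (fun t => t.2.2) = pvG tc z := by
    rw [hraw, List.filter_map, List.map_map]
    have hcomp : ((fun t : Int × Int × String => t.2.2) ∘ f) =
        fun p : Int × String × List Int => p.2.1 := rfl
    have hcomp2 : (pb ∘ f) = fun p : Int × String × List Int =>
        (fun c : List Int => decide (ty - 50 ≤ PySem.List.pyGetD c 1 0) &&
          decide (PySem.List.pyGetD c 1 0 ≤ ty)) p.2.2 := rfl
    rw [hcomp, hcomp2]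
    rw [pvEnumFilter z (fun c : List Int => decide (ty - 50 ≤ PySem.List.pyGetD c 1 0) &&
          decide (PySem.List.pyGetD c 1 0 ≤ ty)) 0]
    unfold pvG
    congr 1
    apply List.filter_congr
    intro q _
    simp only [pairA_pred, ← hty]
    congr 1 <;> rw [decide_eq_decide] <;> omega
  have hiff2 : (lo < hi) ↔ (s.drop lo).take (hi - lo) ≠ [] := by
    constructor
    · intro hlt hnil
      have hsl : hi ≤ s.length := by omega
      have := congrArg List.length hnil
      simp at this
      omega
    · intro hne
      by_contra hge
      push_neg at hge
      have : hi - lo = 0 := by omega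
      simp [this] at hne
  constructor
  · rw [← hG, ne_eq, List.map_eq_nil_iff, ← hsortwin, PySem.List.sorted_eq_nil_iff]
    simpa using hiff2
  · rw [hslice, hsortwin, hG]

-- ===== VERDICT (by name: the statement is the Claim_ definition above) =====
-- A's per-text step equals B's per-text step
theorem pvStepFun_eq (img_list : List String) (img_coordinates_list : List (List Int))
    (acc : List String × List (List String)) (tp : List (List Int) × String) :
    (let st := (img_list.zip img_coordinates_list).foldl (pairA_inner tp.1 tp.2) ([], (false, acc.1))
     ((st.2.2, if st.2.1 then acc.2 ++ [st.1] else acc.2) : List String × List (List String))) =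
    (let ty := PySem.List.pyGetD (PySem.List.pyGetD tp.1 0 []) 1 0
     let lo := PySem.List.bisectLeft
       ((PySem.List.sorted ((PySem.List.enumerate (img_list.zip img_coordinates_list)).map (fun p => (PySem.List.pyGetD p.2.2 1 0, p.1, p.2.1))) (fun t => toLex (t.1, t.2.1))).map (fun t => t.1)) (ty - 50)
     let hi := PySem.List.bisectRight
       ((PySem.List.sorted ((PySem.List.enumerate (img_list.zip img_coordinates_list)).map (fun p => (PySem.List.pyGetD p.2.2 1 0, p.1, p.2.1))) (fun t => toLex (t.1, t.2.1))).map (fun t => t.1)) ty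
     if lo < hi then
       (acc.1 ++ [tp.2],
        acc.2 ++ [(PySem.List.sorted (PySem.List.slice
            (PySem.List.sorted ((PySem.List.enumerate (img_list.zip img_coordinates_list)).map (fun p => (PySem.List.pyGetD p.2.2 1 0, p.1, p.2.1))) (fun t => toLex (t.1, t.2.1)))
            (some (lo : Int)) (some (hi : Int))) (fun t => t.2.1)).map (fun t => t.2.2)])
     else acc) := by
  obtain ⟨h1, h2⟩ := pvStep_eq (img_list.zip img_coordinates_list) tp.1
  dsimp only
  rw [pvInnerA_eq]
  by_cases hg : pvG tp.1 (img_list.zip img_coordinates_list) = []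
  · simp [h1, hg]
  · simp [h1, hg, h2]

theorem pairImagetoText_spec : Claim_equal_pairImagetoText := by
  intro etl img_list img_coordinates_list hdom hpre
  clear hdom hpre
  unfold Spec_pairImagetoText pairImagetoText pairImagetoText_alt
  dsimp only
  induction etl using List.reverseRecOn with
  | nil => rfl
  | append_singleton rest tp ih =>
    rw [List.foldl_append, List.foldl_append, ← ih]
    simp only [List.foldl_cons, List.foldl_nil]
    exact pvStepFun_eq img_list img_coordinates_list _ tp
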